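-- pv_equiv track=rewrite | github.com/pypi-data/pypi-mirror-323 | packages/melektrodica/melektrodica-1.0.0.tar.gz/melektrodica-1.0.0/melektrodica/tools.py | format_latex_chemical
-- ===== SOURCE A (Python) =====
-- def format_latex_chemical(species):
--     """
--     Formats a list of chemical species names into LaTeX string representations. The function
--     formats individual species to include subscript notation for digits and superscript notation
--     for positive charges (e.g., "+"). The resulting formatted names are suitable for inclusion
--     in LaTeX documents.
--
--     Parameters
--     ----------
--     species : list of str
--         A list of chemical species represented as strings.
--
--     Returns
--     -------
--     list of str
--         A list of LaTeX-formatted strings where each string corresponds to the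
--         LaTeX representation of the respective chemical species in the input list.
--     """
--     chemicals = []
--     for chem in species:
--         # Añade subíndices: coloca lo que está después de un número como "_" para subíndice
--         formatted = ""
--         for char in chem:
--             if char.isdigit():
--                 formatted += f"_{char}"  # Usa subíndice en LaTeX
--             elif char == "+":
--                 formatted += "^+"
--             else:
--                 formatted += char
--         chemicals.append(
--             f"$\\mathrm{{{formatted}}}$"
--         )  # Agregar delimitadores de LaTeX
--     return chemicals
-- ===== SOURCE B (Python) =====
-- def format_latex_chemical(species):
--     chemicals = []
--     for chem in species:
--         # Stage 1: collect the indices of characters that need LaTeX markup.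
--         idxs = [i for i, ch in enumerate(chem) if ch.isdigit() or ch == "+"]
--         # Stage 2: stitch together the untouched slices between those indices
--         # and the markup pieces, then wrap in the LaTeX delimiters.
--         pieces = []
--         prev = 0
--         for i in idxs:
--             pieces.append(chem[prev:i])
--             pieces.append("_" + chem[i] if chem[i].isdigit() else "^+")
--             prev = i + 1
--         pieces.append(chem[prev:])
--         chemicals.append("$\\mathrm{" + "".join(pieces) + "}$")
--     return chemicals
-- ===== Notes on version B (the rewrite author's own statement) =====
-- stated objective: alternative
-- what changed: Replaces A's single-pass character-by-character string accumulation by a two-stage segment algorithm: first collect the indices of digits/'+', then stitch the untouched slices between those indices together with the markup pieces and join once.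
import Mathlib
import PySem

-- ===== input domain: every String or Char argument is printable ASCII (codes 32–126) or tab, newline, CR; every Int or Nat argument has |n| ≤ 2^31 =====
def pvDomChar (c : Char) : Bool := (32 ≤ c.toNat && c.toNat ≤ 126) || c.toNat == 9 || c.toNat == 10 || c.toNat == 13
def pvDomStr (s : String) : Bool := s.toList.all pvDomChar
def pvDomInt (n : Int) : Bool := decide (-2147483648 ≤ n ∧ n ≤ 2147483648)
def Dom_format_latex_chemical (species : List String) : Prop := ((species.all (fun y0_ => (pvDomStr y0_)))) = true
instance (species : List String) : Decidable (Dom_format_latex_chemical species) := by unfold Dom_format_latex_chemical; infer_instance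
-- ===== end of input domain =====

-- B replaces A's per-character accumulate-as-you-go loop by a two-stage segment
-- algorithm: collect the indices of digits/'+', then stitch the untouched slices
-- between them together with the markup pieces (alternative decomposition).

-- ===== PORT A =====
-- Literal port of A: outer loop appends one formatted string per species; inner loop
-- builds `formatted` character by character (strings handled as List Char).
def format_latex_chemical (species : List String) : List String :=
  species.foldl (fun chemicals chem =>
    let formatted : List Char :=
      chem.toList.foldl (fun formatted char =>
        if PySem.Chars.isdigit char then formatted ++ ['_', char]
        else if char = '+' then formatted ++ ['^', '+']
        else formatted ++ [char]) []
    chemicals ++ [String.ofList ("$\\mathrm{".toList ++ formatted ++ "}$".toList)]) []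

-- ===== PORT B =====
-- Stage 1 of B: [i for i, ch in enumerate(chem) if ch.isdigit() or ch == "+"]
def pvSpecIdx (cs : List Char) : List Int :=
  ((PySem.List.enumerate cs).filter
    (fun p => PySem.Chars.isdigit p.2 || p.2 == '+')).map (·.1)

-- Stage 2 of B: the stitching loop over the index list (pieces, prev) and the final join.
def pvAssemble (cs : List Char) : List Char :=
  let r := (pvSpecIdx cs).foldl (fun (st : List (List Char) × Int) i =>
    (st.1 ++ [PySem.List.slice cs (some st.2) (some i)]
          ++ [if PySem.Chars.isdigit (PySem.List.pyGetD cs i ' ')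
              then ['_', PySem.List.pyGetD cs i ' '] else ['^', '+']],
     i + 1)) ([], 0)
  (r.1 ++ [PySem.List.slice cs (some r.2) none]).flatten

def format_latex_chemical_alt (species : List String) : List String :=
  species.foldl (fun chemicals chem =>
    chemicals ++ [String.ofList ("$\\mathrm{".toList ++ pvAssemble chem.toList ++ "}$".toList)]) []

-- ===== PRECONDITION & SPEC =====
def Spec_format_latex_chemical (species : List String) (out : List String) : Prop := out = format_latex_chemical_alt species
instance (species : List String) (out : List String) : Decidable (Spec_format_latex_chemical species out) := by unfold Spec_format_latex_chemical; infer_instance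

-- ===== CLAIM (what is proved, stated in full; the proofs are below) =====
def Claim_equal_format_latex_chemical : Prop := ∀ (species : List String), Dom_format_latex_chemical species → Spec_format_latex_chemical species (format_latex_chemical species)

-- ===== LEMMAS AND PROOFS =====

-- A's per-character replacement
def pvTr (c : Char) : List Char :=
  if PySem.Chars.isdigit c then ['_', c] else if c = '+' then ['^', '+'] else [c]

def pvSp (c : Char) : Bool := PySem.Chars.isdigit c || c == '+'

theorem pvTr_of_not_sp {c : Char} (h : pvSp c = false) : pvTr c = [c] := by
  unfold pvSp at h
  unfold pvTr
  simp only [Bool.or_eq_false_iff, beq_eq_false_iff_ne, ne_eq] at h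
  rw [h.1, if_neg Bool.false_ne_true, if_neg h.2]

theorem pvFlatMap_tr_of_not_sp {l : List Char} (h : ∀ c ∈ l, pvSp c = false) :
    l.flatMap pvTr = l := by
  induction l with
  | nil => rfl
  | cons c l ih =>
    simp only [List.flatMap_cons, pvTr_of_not_sp (h c (List.mem_cons_self)),
      ih (fun d hd => h d (List.mem_cons_of_mem _ hd))]
    rfl

-- the enumerate-filter-map index list, starting at s
def pvSpecIdxFrom (cs : List Char) (s : Int) : List Int :=
  ((PySem.List.enumerate cs s).filter
    (fun p => PySem.Chars.isdigit p.2 || p.2 == '+')).map (·.1)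

theorem pvSpecIdxFrom_cons (c : Char) (cs : List Char) (s : Int) :
    pvSpecIdxFrom (c :: cs) s =
      if pvSp c then s :: pvSpecIdxFrom cs (s + 1) else pvSpecIdxFrom cs (s + 1) := by
  unfold pvSpecIdxFrom pvSp
  rw [PySem.List.enumerate_cons, List.filter_cons]
  by_cases h : (PySem.Chars.isdigit c || c == '+') = true
  · simp [h]
  · simp [h]

-- the B stitching step
def pvStep (full : List Char) (st : List (List Char) × Int) (i : Int) : List (List Char) × Int :=
  (st.1 ++ [PySem.List.slice full (some st.2) (some i)]
        ++ [if PySem.Chars.isdigit (PySem.List.pyGetD full i ' ')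
            then ['_', PySem.List.pyGetD full i ' '] else ['^', '+']],
   i + 1)

-- Main invariant: folding the index list of the suffix `cs` (which is full.drop s),
-- starting with pending segment beginning at prev (all of full[prev:s] non-special),
-- yields exactly the per-character translation of full.drop prev.
theorem pvMain (cs : List Char) : ∀ (s prev : Nat) (acc : List (List Char)),
    prev ≤ s → ∀ (full : List Char), full.drop s = cs →
    (∀ c ∈ (full.drop prev).take (s - prev), pvSp c = false) →
    (let r := (pvSpecIdxFrom cs (s : Int)).foldl (pvStep full) (acc, (prev : Int))
     (r.1 ++ [PySem.List.slice full (some r.2) none]).flatten)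
    = acc.flatten ++ (full.drop prev).flatMap pvTr := by
  induction cs with
  | nil =>
    intro s prev acc hps full hdrop hrun
    show ((acc ++ [PySem.List.slice full (some (prev : Int)) none]).flatten) = _
    rw [PySem.List.slice_from_natCast, List.flatten_append]
    have hsplit : full.drop prev = (full.drop prev).take (s - prev) := by
      conv_lhs => rw [← List.take_append_drop (s - prev) (full.drop prev)]
      rw [List.drop_drop, Nat.add_sub_cancel' hps, hdrop, List.append_nil]
    rw [pvFlatMap_tr_of_not_sp (fun c hcm => hrun c (hsplit ▸ hcm))]
    simp
  | cons c cs ih =>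
    intro s prev acc hps full hdrop hrun
    have hget : full[s]? = some c := by
      have h0 : (full.drop s)[0]? = full[s + 0]? := List.getElem?_drop
      rw [hdrop] at h0; simpa using h0.symm
    have hdrop' : full.drop (s + 1) = cs := by
      have h1 : List.drop 1 (List.drop s full) = List.drop (s + 1) full := List.drop_drop
      rw [hdrop] at h1; simpa using h1.symm
    have hcast : ((s : Int) + 1) = (((s + 1 : Nat)) : Int) := by push_cast; ring
    rw [pvSpecIdxFrom_cons]
    by_cases hc : pvSp c = true
    · rw [if_pos hc]
      show (let r := (pvSpecIdxFrom cs ((s : Int) + 1)).foldl (pvStep full)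
              (pvStep full (acc, (prev : Int)) (s : Int));
            (r.1 ++ [PySem.List.slice full (some r.2) none]).flatten) = _
      have hstep : pvStep full (acc, (prev : Int)) (s : Int)
          = (acc ++ [(full.drop prev).take (s - prev)] ++ [pvTr c], ((s + 1 : Nat) : Int)) := by
        unfold pvStep
        have hgd : PySem.List.pyGetD full (s : Int) ' ' = c := by
          rw [PySem.List.pyGetD_natCast]
          simp [List.getD, hget]
        rw [hgd, PySem.List.slice_natCast]
        have htr : (if PySem.Chars.isdigit c then ['_', c] else ['^', '+']) = pvTr c := by
          unfold pvTr
          by_cases hd : PySem.Chars.isdigit c = true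
          · rw [if_pos hd, if_pos hd]
          · have hplus : c = '+' := by
              unfold pvSp at hc
              simpa [hd] using hc
            rw [if_neg hd, if_neg hd, if_pos hplus]
        rw [htr]
        simp
      rw [hstep, hcast]
      rw [ih (s + 1) (s + 1) _ le_rfl full hdrop' (by simp)]
      have hsplit : full.drop prev = (full.drop prev).take (s - prev) ++ c :: full.drop (s + 1) := by
        conv_lhs => rw [← List.take_append_drop (s - prev) (full.drop prev)]
        rw [List.drop_drop, Nat.add_sub_cancel' hps, hdrop, hdrop']
      conv_rhs => rw [hsplit]
      simp only [List.flatten_append, List.flatten_cons, List.flatMap_append, List.flatMap_cons,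
        List.flatten_nil, List.append_nil, List.append_assoc]
      rw [pvFlatMap_tr_of_not_sp hrun]
    · rw [if_neg hc, hcast]
      refine ih (s + 1) prev acc (by omega) full hdrop' ?_
      intro d hd
      have htake : (full.drop prev).take (s + 1 - prev)
          = (full.drop prev).take (s - prev) ++ [c] := by
        have h1 : s + 1 - prev = (s - prev) + 1 := by omega
        rw [h1, List.take_add_one]
        have h2 : (full.drop prev)[s - prev]? = some c := by
          have h3 : (full.drop prev)[s - prev]? = full[prev + (s - prev)]? := List.getElem?_drop
          rw [Nat.add_sub_cancel' hps] at h3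
          rw [h3, hget]
        rw [h2]; rfl
      rw [htake] at hd
      rcases List.mem_append.mp hd with h | h
      · exact hrun d h
      · rw [List.mem_singleton.mp h]
        exact Bool.eq_false_iff.mpr hc

-- B's inner stage pipeline equals A's per-character translation.
theorem pvAssemble_eq (cs : List Char) : pvAssemble cs = cs.flatMap pvTr := by
  have h := pvMain cs 0 0 [] le_rfl cs (by simp) (by simp)
  unfold pvAssemble
  have hIdx : pvSpecIdx cs = pvSpecIdxFrom cs (0 : Int) := rfl
  rw [hIdx]
  have hstep : (fun (st : List (List Char) × Int) i =>
      (st.1 ++ [PySem.List.slice cs (some st.2) (some i)]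
            ++ [if PySem.Chars.isdigit (PySem.List.pyGetD cs i ' ')
                then ['_', PySem.List.pyGetD cs i ' '] else ['^', '+']],
       i + 1)) = pvStep cs := rfl
  rw [hstep]
  simpa using h

-- A's inner loop equals the per-character translation.
theorem pvInner_eq (cs : List Char) :
    cs.foldl (fun formatted char =>
        if PySem.Chars.isdigit char then formatted ++ ['_', char]
        else if char = '+' then formatted ++ ['^', '+']
        else formatted ++ [char]) []
    = cs.flatMap pvTr := by
  have hstep : (fun (formatted : List Char) char =>
        if PySem.Chars.isdigit char then formatted ++ ['_', char]
        else if char = '+' then formatted ++ ['^', '+']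
        else formatted ++ [char])
      = fun formatted char => formatted ++ pvTr char := by
    funext a c; unfold pvTr; split_ifs <;> rfl
  rw [hstep, PySem.List.foldl_append_eq_flatMap]
  rfl

-- ===== VERDICT (by name: the statement is the Claim_ definition above) =====
theorem format_latex_chemical_spec : Claim_equal_format_latex_chemical := by
  intro species _
  show format_latex_chemical species = format_latex_chemical_alt species
  unfold format_latex_chemical format_latex_chemical_alt
  rw [PySem.List.foldl_append_singleton_eq_map, PySem.List.foldl_append_singleton_eq_map]
  simp only [List.nil_append]
  exact List.map_congr_left (fun chem _ => by rw [pvInner_eq, pvAssemble_eq])
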